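-- pv_equiv track=rewrite | github.com/Ohwooseok/CodingTest | 프로그래머스/3/64062. 징검다리 건너기/징검다리 건너기.py | solution
-- ===== SOURCE A (Python) =====
-- def solution(stones, k):
--     left = 1
--     right = max(stones)
--     answer = 0
--
--     def can_cross(x):
--         skip = 0
--         for stone in stones:
--             if stone < x:
--                 skip += 1
--                 if skip >= k:
--                     return False
--             else:
--                 skip = 0
--         return True
--
--     while left <= right:
--         mid = (left + right) // 2
--         if can_cross(mid):
--             answer = mid
--             left = mid + 1
--         else:
--             right = mid - 1
--
--     return answer
-- ===== SOURCE B (Python) =====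
-- def solution(stones, k):
--     # One pass over size-k windows: the tallest crowd that can cross is the
--     # smallest window maximum, clamped below at 0 (crossing counts start at 1).
--     if k > len(stones):
--         return max(0, max(stones))
--     best = None
--     rest = stones
--     while len(rest) >= k:
--         m = max(rest[:k])
--         best = m if best is None else min(best, m)
--         rest = rest[1:]
--     return max(0, best)
-- ===== Notes on version B (the rewrite author's own statement) =====
-- stated objective: alternative
-- what changed: Replaces the binary search over heights with its repeated can_cross feasibility scans by a direct single scan over the size-k windows: the answer is the minimum window maximum, clamped at 0, so no search and no feasibility predicate.
-- outside the precondition, e.g. on solution([3, 2, 5], 0): A returns 2, B raises ValueError; on solution([4, 1], -3): A returns 1, B raises ValueError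
import Mathlib
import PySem

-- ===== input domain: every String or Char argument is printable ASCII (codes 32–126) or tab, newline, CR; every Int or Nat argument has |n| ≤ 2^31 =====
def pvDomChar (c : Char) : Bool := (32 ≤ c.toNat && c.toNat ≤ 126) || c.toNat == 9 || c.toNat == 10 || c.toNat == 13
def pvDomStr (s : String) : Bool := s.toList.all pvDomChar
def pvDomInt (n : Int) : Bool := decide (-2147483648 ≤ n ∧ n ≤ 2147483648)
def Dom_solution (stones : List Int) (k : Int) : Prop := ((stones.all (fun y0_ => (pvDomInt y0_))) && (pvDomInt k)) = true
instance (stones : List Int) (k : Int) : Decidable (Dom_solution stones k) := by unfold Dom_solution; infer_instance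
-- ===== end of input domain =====

-- B replaces A's binary search over heights by one scan of the size-k windows
-- (answer = min window maximum, clamped at 0): an alternative direct algorithm.

-- ===== PORT A =====
-- can_cross(x): scan stones counting consecutive stones < x
def ccGo (k : Int) (x : Int) : List Int → Int → Bool
  | [], _ => true
  | s :: rest, skip =>
    if s < x then
      if skip + 1 ≥ k then false else ccGo k x rest (skip + 1)
    else ccGo k x rest 0

def canCross (stones : List Int) (k : Int) (x : Int) : Bool := ccGo k x stones 0

-- the while left <= right binary-search loop
def loopA (stones : List Int) (k : Int) (left right answer : Int) : Int :=
  if h : left ≤ right then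
    let mid := PySem.Int.floordiv (left + right) 2
    if canCross stones k mid then loopA stones k (mid + 1) right mid
    else loopA stones k left (mid - 1) answer
  else answer
termination_by (right + 1 - left).toNat
decreasing_by
  · have hb := PySem.Int.floordiv_two_mid_bounds h
    omega
  · have hb := PySem.Int.floordiv_two_mid_bounds h
    omega

def solution (stones : List Int) (k : Int) : Int :=
  loopA stones k 1 ((PySem.List.max? stones (fun y => y)).getD 0) 0
  -- max(stones) raises on []; Pre_ excludes that, .getD 0 is never read there

-- ===== PORT B =====
-- while len(rest) >= k: best = min(best, max(rest[:k])); rest = rest[1:]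
-- (the extra 'rest ≠ []' guard only makes the recursion total where the
--  Python loop diverges, i.e. k ≤ 0; Pre_ has 1 ≤ k, where it is redundant)
def winGo (k : Int) (rest : List Int) (best : Option Int) : Option Int :=
  if h : k ≤ (rest.length : Int) ∧ rest ≠ [] then
    let m := (PySem.List.max? (PySem.List.slice rest (some 0) (some k)) (fun y => y)).getD 0
    winGo k rest.tail (some (match best with | none => m | some b => min b m))
  else best
termination_by rest.length
decreasing_by
  have : 0 < rest.length := List.length_pos_iff.mpr h.2
  simp [List.length_tail]; omega

def solution_alt (stones : List Int) (k : Int) : Int :=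
  if k > (stones.length : Int) then
    max 0 ((PySem.List.max? stones (fun y => y)).getD 0)
  else
    max 0 ((winGo k stones none).getD 0)

-- ===== PRECONDITION & SPEC =====
-- Pre_ excludes empty stones (A's max([]) raises ValueError) and k ≤ 0, which is
-- outside the task's natural domain (k is a positive crossing limit): there A's
-- accidental all-stones scan returns a value while B's window loop raises/diverges.
def Pre_solution (stones : List Int) (k : Int) : Prop := stones ≠ [] ∧ 1 ≤ k
instance (stones : List Int) (k : Int) : Decidable (Pre_solution stones k) := by
  unfold Pre_solution; infer_instance

def pvWitness_solution : List Int × Int := ([2, 4, 5, 3, 2, 1, 4, 2, 5, 1], 3)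

def Spec_solution (stones : List Int) (k : Int) (out : Int) : Prop := out = solution_alt stones k
instance (stones : List Int) (k : Int) (out : Int) : Decidable (Spec_solution stones k out) := by unfold Spec_solution; infer_instance

-- ===== CLAIM (what is proved, stated in full; the proofs are below) =====
def Claim_equal_solution : Prop := ∀ (stones : List Int) (k : Int), Dom_solution stones k → Pre_solution stones k → Spec_solution stones k (solution stones k)

-- ===== LEMMAS AND PROOFS =====

-- all elements below the probe height x
def allLt (x : Int) (l : List Int) : Prop := ∀ a ∈ l, a < x

-- the maximum of the first window of t (B's m for rest = t)
def wmax (k : Int) (t : List Int) : Int :=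
  (PySem.List.max? (PySem.List.slice t (some 0) (some k)) (fun y => y)).getD 0

-- the list of window maxima B's loop folds min over
def wmaxes (k : Int) : List Int → List Int
  | [] => []
  | a :: r => if k ≤ ((a :: r).length : Int) then wmax k (a :: r) :: wmaxes k r else []

-- B's loop is a min-fold over wmaxes
theorem winGo_eq_foldl (k : Int) (l : List Int) (b : Option Int) :
    winGo k l b =
      (wmaxes k l).foldl (fun acc m => some (match acc with | none => m | some x0 => min x0 m)) b := by
  induction l generalizing b with
  | nil => rw [winGo]; simp [wmaxes]
  | cons a r ih =>
    rw [winGo, wmaxes]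
    by_cases h : k ≤ ((a :: r).length : Int)
    · simp only [h, if_true, List.cons_ne_self, ne_eq, not_false_iff, and_true, dif_pos,
        List.tail_cons, List.foldl_cons]
      exact ih _
    · have h' : ¬ k ≤ (r.length : Int) + 1 := by simp only [List.length_cons] at h; push_cast at h; exact h
      simp [h', wmaxes]

theorem foldl_opt_min (b : Int) (ws : List Int) :
    ws.foldl (fun acc m => some (match acc with | none => m | some x0 => min x0 m)) (some b)
      = some (ws.foldl min b) := by
  induction ws generalizing b with
  | nil => rfl
  | cons w ws ih => simp only [List.foldl_cons]; exact ih (min b w)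

theorem le_foldl_min (x b : Int) (ws : List Int) :
    x ≤ ws.foldl min b ↔ x ≤ b ∧ ∀ m ∈ ws, x ≤ m := by
  induction ws generalizing b with
  | nil => simp
  | cons w ws ih =>
    simp only [List.foldl_cons, ih (min b w), le_min_iff, List.mem_cons]
    constructor
    · rintro ⟨⟨h1, h2⟩, h3⟩; exact ⟨h1, fun m hm => hm.elim (fun e => e ▸ h2) (h3 m)⟩
    · rintro ⟨h1, h2⟩; exact ⟨⟨h1, h2 w (Or.inl rfl)⟩, fun m hm => h2 m (Or.inr hm)⟩

theorem foldl_min_mem (b : Int) (ws : List Int) :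
    ws.foldl min b = b ∨ ws.foldl min b ∈ ws := by
  induction ws generalizing b with
  | nil => exact Or.inl rfl
  | cons w ws ih =>
    simp only [List.foldl_cons, List.mem_cons]
    rcases ih (min b w) with h | h
    · rcases min_cases b w with ⟨e, _⟩ | ⟨e, _⟩
      · exact Or.inl (h.trans e)
      · exact Or.inr (Or.inl (h.trans e))
    · exact Or.inr (Or.inr h)

theorem mem_wmaxes (k m : Int) (l : List Int) (hk : 1 ≤ k) :
    m ∈ wmaxes k l ↔ ∃ t, t <:+ l ∧ k ≤ (t.length : Int) ∧ m = wmax k t := by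
  induction l with
  | nil =>
    simp only [wmaxes, List.not_mem_nil, false_iff, not_exists]
    rintro t ⟨ht, hlen, -⟩
    have := List.suffix_nil.mp ht
    subst this
    simp only [List.length_nil, Nat.cast_zero] at hlen
    omega
  | cons a r ih =>
    rw [wmaxes]
    by_cases h : k ≤ ((a :: r).length : Int)
    · simp only [h, if_true, List.mem_cons, ih]
      constructor
      · rintro (rfl | ⟨t, ht, hlen, rfl⟩)
        · exact ⟨a :: r, List.suffix_refl _, h, rfl⟩
        · exact ⟨t, ht.trans (List.suffix_cons a r), hlen, rfl⟩
      · rintro ⟨t, ht, hlen, rfl⟩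
        rcases List.suffix_cons_iff.mp ht with rfl | ht'
        · exact Or.inl rfl
        · exact Or.inr ⟨t, ht', hlen, rfl⟩
    · simp only [h, if_false, List.not_mem_nil, false_iff, not_exists]
      rintro t ⟨ht, hlen, -⟩
      have hle := ht.length_le
      simp only [List.length_cons] at h hle
      push_cast at h
      omega

theorem wmax_lt_iff (k x : Int) (t : List Int) (hk : 1 ≤ k) (hlen : k ≤ (t.length : Int)) :
    wmax k t < x ↔ allLt x (t.take k.toNat) := by
  have hne : t.take k.toNat ≠ [] := by
    rw [ne_eq, List.take_eq_nil_iff]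
    push_neg
    constructor
    · omega
    · intro h; subst h; simp at hlen; omega
  obtain ⟨mw, hmw⟩ : ∃ mw, PySem.List.max? (t.take k.toNat) (fun y => y) = some mw := by
    cases hc : PySem.List.max? (t.take k.toNat) (fun y => y) with
    | none => exact absurd ((PySem.List.max?_eq_none_iff _ _).mp hc) hne
    | some mw => exact ⟨mw, rfl⟩
  have hmem := PySem.List.max?_mem hmw
  have hmax := PySem.List.max?_isMax hmw
  unfold wmax
  rw [PySem.List.slice_zero_start, PySem.List.slice_to t (by omega : (0:Int) ≤ k), hmw]
  simp only [Option.getD_some]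
  constructor
  · intro h a ha; exact lt_of_le_of_lt (hmax a ha) h
  · intro h; exact h mw hmem

theorem wmax_mem_take (k : Int) (t : List Int) (hk : 1 ≤ k) (hlen : k ≤ (t.length : Int)) :
    wmax k t ∈ t.take k.toNat := by
  have hne : t.take k.toNat ≠ [] := by
    rw [ne_eq, List.take_eq_nil_iff]
    push_neg
    constructor
    · omega
    · intro h; subst h; simp at hlen; omega
  obtain ⟨mw, hmw⟩ : ∃ mw, PySem.List.max? (t.take k.toNat) (fun y => y) = some mw := by
    cases hc : PySem.List.max? (t.take k.toNat) (fun y => y) with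
    | none => exact absurd ((PySem.List.max?_eq_none_iff _ _).mp hc) hne
    | some mw => exact ⟨mw, rfl⟩
  have hmem := PySem.List.max?_mem hmw
  unfold wmax
  rw [PySem.List.slice_zero_start, PySem.List.slice_to t (by omega : (0:Int) ≤ k), hmw]
  simpa using hmem

-- a run of ≥ k low stones starting at the front, continuing an initial streak s
def FrontRun (x k s : Int) (l : List Int) : Prop :=
  ∃ p q, l = p ++ q ∧ allLt x p ∧ k ≤ s + (p.length : Int)

-- a run of ≥ k consecutive low stones anywhere
def HasBad (x k : Int) (l : List Int) : Prop :=
  ∃ u p q, l = u ++ p ++ q ∧ allLt x p ∧ k ≤ (p.length : Int)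

theorem ccGo_false_iff (k x : Int) (hk : 1 ≤ k) :
    ∀ (l : List Int) (s : Int), 0 ≤ s → s < k →
      (ccGo k x l s = false ↔ FrontRun x k s l ∨ HasBad x k l) := by
  intro l
  induction l with
  | nil =>
    intro s hs0 hsk
    simp only [ccGo, Bool.true_eq_false, false_iff]
    rintro (⟨p, q, hpq, -, hlen⟩ | ⟨u, p, q, hpq, -, hlen⟩) <;>
    · have := congrArg List.length hpq
      simp at this
      omega
  | cons a r ih =>
    intro s hs0 hsk
    rw [ccGo]
    by_cases hax : a < x
    · rw [if_pos hax]
      by_cases hk1 : s + 1 ≥ k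
      · rw [if_pos hk1]
        constructor
        · intro _
          refine Or.inl ⟨[a], r, rfl, ?_, by simp; omega⟩
          intro b hb
          simp at hb
          subst hb
          exact hax
        · intro _
          rfl
      · rw [if_neg hk1, ih (s + 1) (by omega) (by omega)]
        constructor
        · rintro (⟨p, q, rfl, hlt, hlen⟩ | ⟨u, p, q, rfl, hlt, hlen⟩)
          · refine Or.inl ⟨a :: p, q, rfl, ?_, by simp; push_cast; omega⟩
            intro b hb
            rcases List.mem_cons.mp hb with rfl | hb
            · exact hax
            · exact hlt b hb
          · exact Or.inr ⟨a :: u, p, q, rfl, hlt, hlen⟩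
        · rintro (⟨p, q, hpq, hlt, hlen⟩ | ⟨u, p, q, hpq, hlt, hlen⟩)
          · rcases List.cons_eq_append_iff.mp hpq with ⟨rfl, -⟩ | ⟨p', rfl, rfl⟩
            · simp only [List.length_nil, Nat.cast_zero] at hlen
              omega
            · refine Or.inl ⟨p', q, rfl, fun c hc => hlt c (List.mem_cons_of_mem _ hc), ?_⟩
              simp only [List.length_cons] at hlen
              push_cast at hlen ⊢
              omega
          · rw [List.append_assoc] at hpq
            rcases List.cons_eq_append_iff.mp hpq with ⟨rfl, hq⟩ | ⟨u', rfl, hr⟩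
            · rcases List.cons_eq_append_iff.mp hq.symm with ⟨rfl, -⟩ | ⟨p', rfl, rfl⟩
              · simp only [List.length_nil, Nat.cast_zero] at hlen
                omega
              · refine Or.inl ⟨p', q, rfl, fun c hc => hlt c (List.mem_cons_of_mem _ hc), ?_⟩
                simp only [List.length_cons] at hlen
                push_cast at hlen ⊢
                omega
            · exact Or.inr ⟨u', p, q, by rw [hr, List.append_assoc], hlt, hlen⟩
    · rw [if_neg hax, ih 0 le_rfl (by omega)]
      constructor
      · rintro (⟨p, q, rfl, hlt, hlen⟩ | ⟨u, p, q, rfl, hlt, hlen⟩)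
        · exact Or.inr ⟨[a], p, q, rfl, hlt, by omega⟩
        · exact Or.inr ⟨a :: u, p, q, rfl, hlt, hlen⟩
      · rintro (⟨p, q, hpq, hlt, hlen⟩ | ⟨u, p, q, hpq, hlt, hlen⟩)
        · rcases List.cons_eq_append_iff.mp hpq with ⟨rfl, -⟩ | ⟨p', rfl, rfl⟩
          · simp only [List.length_nil, Nat.cast_zero] at hlen
            omega
          · exact absurd (hlt a List.mem_cons_self) (by omega)
        · rw [List.append_assoc] at hpq
          rcases List.cons_eq_append_iff.mp hpq with ⟨rfl, hq⟩ | ⟨u', rfl, hr⟩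
          · rcases List.cons_eq_append_iff.mp hq.symm with ⟨rfl, -⟩ | ⟨p', rfl, rfl⟩
            · simp only [List.length_nil, Nat.cast_zero] at hlen
              omega
            · exact absurd (hlt a List.mem_cons_self) (by omega)
          · exact Or.inr ⟨u', p, q, by rw [hr, List.append_assoc], hlt, hlen⟩

theorem hasBad_iff_window (x k : Int) (hk : 1 ≤ k) (l : List Int) :
    HasBad x k l ↔ ∃ t, t <:+ l ∧ k ≤ (t.length : Int) ∧ allLt x (t.take k.toNat) := by
  constructor
  · rintro ⟨u, p, q, rfl, hlt, hlen⟩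
    refine ⟨p ++ q, ⟨u, by rw [List.append_assoc]⟩, ?_, ?_⟩
    · rw [List.length_append]; push_cast; omega
    · have htk : (p ++ q).take k.toNat = p.take k.toNat := by
        apply List.take_append_of_le_length
        omega
      rw [htk]
      intro a ha
      exact hlt a (List.take_subset _ _ ha)
  · rintro ⟨t, ⟨u, hu⟩, hlen, hlt⟩
    refine ⟨u, t.take k.toNat, t.drop k.toNat, ?_, hlt, ?_⟩
    · rw [List.append_assoc, List.take_append_drop, hu]
    · rw [List.length_take]
      omega

theorem canCross_true_iff (stones : List Int) (k x : Int) (hk : 1 ≤ k) :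
    canCross stones k x = true ↔ ∀ m ∈ wmaxes k stones, x ≤ m := by
  unfold canCross
  have hb : ccGo k x stones 0 = true ↔ ¬ (ccGo k x stones 0 = false) := by
    cases ccGo k x stones 0 <;> simp
  rw [hb, ccGo_false_iff k x hk stones 0 le_rfl (by omega)]
  have hfb : FrontRun x k 0 stones → HasBad x k stones := by
    rintro ⟨p, q, hpq, hlt, hlen⟩
    exact ⟨[], p, q, by simpa using hpq, hlt, by omega⟩
  constructor
  · intro hno m hm
    rcases (mem_wmaxes k m stones hk).mp hm with ⟨t, ht, htl, rfl⟩
    by_contra hlt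
    push_neg at hlt
    exact hno (Or.inr ((hasBad_iff_window x k hk stones).mpr
      ⟨t, ht, htl, (wmax_lt_iff k x t hk htl).mp hlt⟩))
  · rintro hall (hf | hbad)
    · rcases (hasBad_iff_window x k hk stones).mp (hfb hf) with ⟨t, ht, htl, hlt⟩
      have := hall (wmax k t) ((mem_wmaxes k (wmax k t) stones hk).mpr ⟨t, ht, htl, rfl⟩)
      exact absurd ((wmax_lt_iff k x t hk htl).mpr hlt) (by omega)
    · rcases (hasBad_iff_window x k hk stones).mp hbad with ⟨t, ht, htl, hlt⟩
      have := hall (wmax k t) ((mem_wmaxes k (wmax k t) stones hk).mpr ⟨t, ht, htl, rfl⟩)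
      exact absurd ((wmax_lt_iff k x t hk htl).mpr hlt) (by omega)

theorem ccGo_true_of_short (k x : Int) :
    ∀ (l : List Int) (s : Int), 0 ≤ s → (l.length : Int) + s < k → ccGo k x l s = true := by
  intro l
  induction l with
  | nil => intro s _ _; rfl
  | cons a r ih =>
    intro s hs0 hsk
    simp only [List.length_cons] at hsk
    push_cast at hsk
    rw [ccGo]
    by_cases hax : a < x
    · rw [if_pos hax, if_neg (by omega)]
      exact ih (s + 1) (by omega) (by omega)
    · rw [if_neg hax]
      exact ih 0 le_rfl (by omega)

-- the binary-search loop against a threshold predicate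
theorem loopA_eq (stones : List Int) (k t : Int) :
    ∀ fuel : Nat, ∀ l r ans : Int, (r + 1 - l).toNat ≤ fuel →
      (∀ x, l ≤ x → x ≤ r → (canCross stones k x = true ↔ x ≤ t)) →
      loopA stones k l r ans = if l ≤ r then (if t < l then ans else min t r) else ans := by
  intro fuel
  induction fuel with
  | zero =>
    intro l r ans hf _
    rw [loopA, dif_neg (by omega), if_neg (by omega)]
  | succ fuel ih =>
    intro l r ans hf hcc
    rw [loopA]
    by_cases hlr : l ≤ r
    · rw [dif_pos hlr]
      obtain ⟨hm1, hm2⟩ := PySem.Int.floordiv_two_mid_bounds hlr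
      set mid := PySem.Int.floordiv (l + r) 2 with hmid
      by_cases hcan : canCross stones k mid
      · rw [if_pos hcan]
        have hmt : mid ≤ t := (hcc mid hm1 hm2).mp hcan
        rw [ih (mid + 1) r mid (by omega) (fun x hx1 hx2 => hcc x (by omega) hx2)]
        split_ifs <;> omega
      · rw [if_neg hcan]
        have htm : t < mid := by
          by_contra hcon
          push_neg at hcon
          exact hcan ((hcc mid hm1 hm2).mpr hcon)
        rw [ih l (mid - 1) ans (by omega) (fun x hx1 hx2 => hcc x hx1 (by omega))]
        split_ifs <;> omega
    · rw [dif_neg hlr, if_neg hlr]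

-- ===== VERDICT (by name: the statement is the Claim_ definition above) =====
theorem solution_spec : Claim_equal_solution := by
  intro stones k _ hpre
  obtain ⟨hne, hk⟩ := hpre
  unfold Spec_solution solution solution_alt
  obtain ⟨M0, hM0⟩ : ∃ M0, PySem.List.max? stones (fun y => y) = some M0 := by
    cases hc : PySem.List.max? stones (fun y => y) with
    | none => exact absurd ((PySem.List.max?_eq_none_iff _ _).mp hc) hne
    | some m => exact ⟨m, rfl⟩
  have hM0max := PySem.List.max?_isMax hM0
  rw [hM0]
  simp only [Option.getD_some]
  by_cases hkn : k > (stones.length : Int)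
  · rw [if_pos hkn]
    have hcc : ∀ x, 1 ≤ x → x ≤ M0 → (canCross stones k x = true ↔ x ≤ M0) := by
      intro x _ hx
      exact ⟨fun _ => hx, fun _ => ccGo_true_of_short k x stones 0 le_rfl (by omega)⟩
    rw [loopA_eq stones k M0 (M0 + 1 - 1).toNat 1 M0 0 le_rfl hcc]
    split_ifs <;> omega
  · rw [if_neg hkn]
    push_neg at hkn
    have hmem : wmax k stones ∈ wmaxes k stones :=
      (mem_wmaxes k _ stones hk).mpr ⟨stones, List.suffix_refl _, hkn, rfl⟩
    obtain ⟨w, ws, hws⟩ : ∃ w ws, wmaxes k stones = w :: ws := by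
      cases h : wmaxes k stones with
      | nil => rw [h] at hmem; simp at hmem
      | cons w ws => exact ⟨w, ws, rfl⟩
    have hwin : winGo k stones none = some (ws.foldl min w) := by
      rw [winGo_eq_foldl, hws]
      simp only [List.foldl_cons]
      exact foldl_opt_min w ws
    rw [hwin]
    simp only [Option.getD_some]
    have hMmem : ws.foldl min w ∈ wmaxes k stones := by
      rw [hws]
      rcases foldl_min_mem w ws with h | h
      · rw [h]; exact List.mem_cons_self
      · exact List.mem_cons_of_mem _ h
    have hMle : ws.foldl min w ≤ M0 := by
      rcases (mem_wmaxes k _ stones hk).mp hMmem with ⟨t, ht, htl, hMe⟩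
      have hmem2 : ws.foldl min w ∈ stones :=
        ht.subset (List.take_subset _ _ (hMe ▸ wmax_mem_take k t hk htl))
      simpa using hM0max _ hmem2
    have hcc : ∀ x, 1 ≤ x → x ≤ M0 → (canCross stones k x = true ↔ x ≤ ws.foldl min w) := by
      intro x _ _
      rw [canCross_true_iff stones k x hk, hws, le_foldl_min]
      constructor
      · intro h
        exact ⟨h w List.mem_cons_self, fun m hm => h m (List.mem_cons_of_mem _ hm)⟩
      · rintro ⟨h1, h2⟩ m hm
        rcases List.mem_cons.mp hm with rfl | hm'
        · exact h1
        · exact h2 m hm'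
    rw [loopA_eq stones k (ws.foldl min w) (M0 + 1 - 1).toNat 1 M0 0 le_rfl hcc]
    split_ifs <;> omega
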